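-- pv_equiv track=rewrite | github.com/ItsUnagii/CSE415Wi25 | A4/bbking30_KInARow.py | opp_blocked
-- ===== SOURCE A (Python) =====
-- def opp_blocked(curr_player, opp_player, segment, k):
--     opp_line, max_opp_line = [], []
--     segment = list(segment)
--
--     for i in range(len(segment)):
--         if segment[i] == opp_player:
--             if i > 0 and segment[i - 1] != opp_player:
--                 opp_line = []
--             opp_line.append(i)
--             if len(opp_line) > len(max_opp_line):
--                 max_opp_line = opp_line[:]
--
--     if (not max_opp_line or len(max_opp_line) < k - 4 or
--             (k > len(segment) > len(max_opp_line))):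
--         return 0
--
--     start = max_opp_line[0] - 1 if max_opp_line[0] > 0 else max_opp_line[0]
--     end = max_opp_line[-1] + 1 if max_opp_line[-1] < (len(segment) - 1) else max_opp_line[-1]
--     potential_blocked_section = segment[start:end + 1]
--
--     if potential_blocked_section.count(curr_player) > 0 and \
--             ((segment[start] == curr_player or segment[start] == '-') or
--              (segment[end] == curr_player or segment[end] == '-')):
--         if (k - 2) <= len(max_opp_line) < k:
--             return 3
--         elif (k - 4) <= len(max_opp_line) < k - 2:
--             return 2
--         else:
--             return 1
--
--     return 0
-- ===== SOURCE B (Python) =====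
-- def opp_blocked(curr_player, opp_player, segment, k):
--     seg = list(segment)
--     n = len(seg)
--     best_start, best_len = 0, 0
--     # walk run by run: the inner while jumps to the end of each opponent run
--     i = 0
--     while i < n:
--         if seg[i] == opp_player:
--             j = i
--             while j < n and seg[j] == opp_player:
--                 j += 1
--             if j - i > best_len:
--                 best_start, best_len = i, j - i
--             i = j
--         else:
--             i += 1
--
--     if best_len == 0 or best_len < k - 4 or (k > n > best_len):
--         return 0
--
--     first, last = best_start, best_start + best_len - 1
--     start = first - 1 if first > 0 else first
--     end = last + 1 if last < n - 1 else last
--     section = seg[start:end + 1]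
--
--     if curr_player in section and (seg[start] in (curr_player, '-') or
--                                    seg[end] in (curr_player, '-')):
--         if k - 2 <= best_len < k:
--             return 3
--         if k - 4 <= best_len < k - 2:
--             return 2
--         return 1
--     return 0
-- ===== Notes on version B (the rewrite author's own statement) =====
-- stated objective: alternative
-- what changed: Replaces the index-list accumulation (building and copying lists of run indices with a reset-on-new-run step) by a run-by-run two-pointer scan that keeps only (best_start, best_len), with a strict '>' so ties keep the first run; the scoring tail works from those two numbers.
import Mathlib
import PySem

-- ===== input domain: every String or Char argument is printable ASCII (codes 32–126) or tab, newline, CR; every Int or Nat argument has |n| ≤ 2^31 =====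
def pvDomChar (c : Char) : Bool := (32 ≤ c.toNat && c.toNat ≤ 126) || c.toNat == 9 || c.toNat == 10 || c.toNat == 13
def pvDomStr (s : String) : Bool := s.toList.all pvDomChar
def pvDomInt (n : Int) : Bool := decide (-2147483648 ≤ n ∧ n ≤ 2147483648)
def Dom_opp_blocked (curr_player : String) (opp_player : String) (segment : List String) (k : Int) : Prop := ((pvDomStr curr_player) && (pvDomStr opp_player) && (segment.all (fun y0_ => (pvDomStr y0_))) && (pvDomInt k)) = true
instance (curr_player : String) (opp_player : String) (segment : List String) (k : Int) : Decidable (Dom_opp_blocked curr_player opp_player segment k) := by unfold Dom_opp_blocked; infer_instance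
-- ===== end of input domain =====

-- B replaces A's index-list building/copying by a run-by-run two-pointer scan keeping only
-- (best_start, best_len); same return value everywhere (alternative decomposition, not claimed faster).

-- ===== PORT A =====
-- one iteration of A's for-loop over i in range(len(segment)); state = (opp_line, max_opp_line)
-- (run indices are nonnegative throughout, represented as Nat)
def oppBodyA (seg : List String) (opp_player : String) (st : List Nat × List Nat) (i : Nat) : List Nat × List Nat :=
  if seg[i]! = opp_player then
    let oppL := if 0 < i ∧ seg[i-1]! ≠ opp_player then ([] : List Nat) else st.1
    let oppL := oppL ++ [i]
    let maxL := if st.2.length < oppL.length then oppL else st.2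
    (oppL, maxL)
  else st

def opp_blocked (curr_player : String) (opp_player : String) (segment : List String) (k : Int) : Int :=
  let seg := segment
  let st := (List.range seg.length).foldl (oppBodyA seg opp_player) ([], [])
  let maxL := st.2
  if maxL = [] ∨ (maxL.length : Int) < k - 4 ∨ ((seg.length : Int) < k ∧ (maxL.length : Int) < (seg.length : Int)) then
    0
  else
    let start := if 0 < maxL.head! then maxL.head! - 1 else maxL.head!
    let fin := if maxL.getLast! < seg.length - 1 then maxL.getLast! + 1 else maxL.getLast!
    let pbs := PySem.List.slice seg (some (start : Int)) (some ((fin : Int) + 1))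
    if 0 < pbs.count curr_player ∧
        ((seg[start]! = curr_player ∨ seg[start]! = "-") ∨ (seg[fin]! = curr_player ∨ seg[fin]! = "-")) then
      if k - 2 ≤ (maxL.length : Int) ∧ (maxL.length : Int) < k then 3
      else if k - 4 ≤ (maxL.length : Int) ∧ (maxL.length : Int) < k - 2 then 2
      else 1
    else 0

-- ===== PORT B =====
-- inner while of Source B: advance j while seg[j] == opp_player
def runEndB (seg : List String) (opp_player : String) (j : Nat) : Nat :=
  if h : j < seg.length ∧ seg[j]! = opp_player then runEndB seg opp_player (j+1) else j
termination_by seg.length - j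
decreasing_by omega

theorem runEndB_ge (seg : List String) (opp : String) (j : Nat) : j ≤ runEndB seg opp j := by
  unfold runEndB
  split
  · exact Nat.le_trans (Nat.le_succ j) (runEndB_ge seg opp (j+1))
  · exact Nat.le_refl j
termination_by seg.length - j
decreasing_by omega

theorem runEndB_gt (seg : List String) (opp : String) (j : Nat)
    (h1 : j < seg.length) (h2 : seg[j]! = opp) : j < runEndB seg opp j := by
  unfold runEndB
  rw [dif_pos ⟨h1, h2⟩]
  exact Nat.lt_of_lt_of_le (Nat.lt_succ_self j) (runEndB_ge seg opp (j+1))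

-- outer while of Source B: i walks run by run, keeping (best_start, best_len)
def scanB (seg : List String) (opp_player : String) (i bs bl : Nat) : Nat × Nat :=
  if h : i < seg.length then
    if hop : seg[i]! = opp_player then
      let j := runEndB seg opp_player i
      if bl < j - i then scanB seg opp_player j i (j - i) else scanB seg opp_player j bs bl
    else scanB seg opp_player (i+1) bs bl
  else (bs, bl)
termination_by seg.length - i
decreasing_by
  · have := runEndB_gt seg opp_player i h hop; omega
  · have := runEndB_gt seg opp_player i h hop; omega
  · omega

def opp_blocked_alt (curr_player : String) (opp_player : String) (segment : List String) (k : Int) : Int :=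
  let seg := segment
  let n := seg.length
  let best := scanB seg opp_player 0 0 0
  let bs := best.1
  let bl := best.2
  if bl = 0 ∨ (bl : Int) < k - 4 ∨ ((n : Int) < k ∧ (bl : Int) < (n : Int)) then
    0
  else
    let first := bs
    let last := bs + bl - 1
    let start := if 0 < first then first - 1 else first
    let fin := if last < n - 1 then last + 1 else last
    let sect := PySem.List.slice seg (some (start : Int)) (some ((fin : Int) + 1))
    if curr_player ∈ sect ∧
        ((seg[start]! = curr_player ∨ seg[start]! = "-") ∨ (seg[fin]! = curr_player ∨ seg[fin]! = "-")) then
      if k - 2 ≤ (bl : Int) ∧ (bl : Int) < k then 3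
      else if k - 4 ≤ (bl : Int) ∧ (bl : Int) < k - 2 then 2
      else 1
    else 0

-- ===== PRECONDITION & SPEC =====
def Spec_opp_blocked (curr_player : String) (opp_player : String) (segment : List String) (k : Int) (out : Int) : Prop := out = opp_blocked_alt curr_player opp_player segment k
instance (curr_player : String) (opp_player : String) (segment : List String) (k : Int) (out : Int) : Decidable (Spec_opp_blocked curr_player opp_player segment k out) := by unfold Spec_opp_blocked; infer_instance

-- ===== CLAIM (what is proved, stated in full; the proofs are below) =====
def Claim_equal_opp_blocked : Prop := ∀ (curr_player : String) (opp_player : String) (segment : List String) (k : Int), Dom_opp_blocked curr_player opp_player segment k → Spec_opp_blocked curr_player opp_player segment k (opp_blocked curr_player opp_player segment k)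

-- ===== LEMMAS AND PROOFS =====

-- the contiguous index run [s, s+1, …, s+L-1]
def mkRun (s L : Nat) : List Nat := (List.range L).map (s + ·)

theorem length_mkRun (s L : Nat) : (mkRun s L).length = L := by simp [mkRun]

theorem mkRun_succ (s L : Nat) : mkRun s (L+1) = mkRun s L ++ [s + L] := by
  simp [mkRun, List.range_succ]

theorem mkRun_eq_nil_iff (s L : Nat) : mkRun s L = [] ↔ L = 0 := by
  constructor
  · intro h; have := length_mkRun s L; rw [h] at this; simpa using this.symm
  · intro h; subst h; rfl

theorem head!_mkRun (s L : Nat) (h : L ≠ 0) : (mkRun s L).head! = s := by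
  cases L with
  | zero => exact absurd rfl h
  | succ L => simp [mkRun, List.range_succ_eq_map, List.head!]

theorem getLast!_mkRun (s L : Nat) (h : L ≠ 0) : (mkRun s L).getLast! = s + L - 1 := by
  cases L with
  | zero => exact absurd rfl h
  | succ L =>
    rw [mkRun_succ]
    simp

-- the update Source B performs at the end of a run of length c starting at s
def updB (bs bl s c : Nat) : Nat × Nat := if bl < c then (s, c) else (bs, bl)

-- A's loop over the interior of a run: indices t … t+m-1 all hold opp, and each predecessor too
theorem runLemma (seg : List String) (opp : String) :
    ∀ (m t s bs0 bl0 : Nat), s < t →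
    (∀ u, t ≤ u → u < t + m → seg[u]! = opp ∧ seg[u-1]! = opp) →
    (List.range' t m).foldl (oppBodyA seg opp) (mkRun s (t - s), mkRun (updB bs0 bl0 s (t - s)).1 (updB bs0 bl0 s (t - s)).2)
      = (mkRun s (t + m - s), mkRun (updB bs0 bl0 s (t + m - s)).1 (updB bs0 bl0 s (t + m - s)).2) := by
  intro m
  induction m with
  | zero => intro t s bs0 bl0 hst hall; simp
  | succ m ih =>
    intro t s bs0 bl0 hst hall
    rw [List.range'_succ, List.foldl_cons]
    have hopp : seg[t]! = opp := (hall t le_rfl (by omega)).1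
    have hprev : seg[t-1]! = opp := (hall t le_rfl (by omega)).2
    have hstep : oppBodyA seg opp (mkRun s (t - s), mkRun (updB bs0 bl0 s (t - s)).1 (updB bs0 bl0 s (t - s)).2) t
        = (mkRun s (t + 1 - s), mkRun (updB bs0 bl0 s (t + 1 - s)).1 (updB bs0 bl0 s (t + 1 - s)).2) := by
      unfold oppBodyA
      rw [if_pos hopp]
      have hnores : ¬ (0 < t ∧ seg[t-1]! ≠ opp) := by
        intro hc; exact hc.2 hprev
      rw [if_neg hnores]
      have happ : mkRun s (t - s) ++ [t] = mkRun s (t - s + 1) := by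
        have ht : s + (t - s) = t := by omega
        rw [mkRun_succ, ht]
      simp only [happ]
      unfold updB
      by_cases hb : bl0 < t - s
      · rw [if_pos hb]
        simp only [length_mkRun]
        rw [if_pos (by omega), if_pos (by omega)]
        have : t - s + 1 = t + 1 - s := by omega
        rw [this]
      · rw [if_neg hb]
        simp only [length_mkRun]
        by_cases hb2 : bl0 < t - s + 1
        · rw [if_pos hb2, if_pos (by omega)]
          have : t - s + 1 = t + 1 - s := by omega
          rw [this]
        · rw [if_neg hb2, if_neg (by omega)]
          have e : t - s + 1 = t + 1 - s := by omega
          rw [e]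
    rw [hstep]
    have := ih (t+1) s bs0 bl0 (by omega) (by intro u h1 h2; exact hall u (by omega) (by omega))
    rw [this]
    have : t + 1 + m - s = t + (m + 1) - s := by omega
    rw [this]

-- runEndB stays within bounds, covers only opp cells, and stops at a non-opp cell or the end
theorem runEndB_le (seg : List String) (opp : String) (j : Nat) (h : j ≤ seg.length) :
    runEndB seg opp j ≤ seg.length := by
  unfold runEndB
  split
  · next hc => exact runEndB_le seg opp (j+1) hc.1
  · exact h
termination_by seg.length - j
decreasing_by omega

theorem runEndB_mem (seg : List String) (opp : String) (j u : Nat)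
    (h1 : j ≤ u) (h2 : u < runEndB seg opp j) : seg[u]! = opp := by
  unfold runEndB at h2
  by_cases hc : j < seg.length ∧ seg[j]! = opp
  · rw [dif_pos hc] at h2
    rcases Nat.eq_or_lt_of_le h1 with he | hl
    · subst he; exact hc.2
    · exact runEndB_mem seg opp (j+1) u hl h2
  · rw [dif_neg hc] at h2; omega
termination_by seg.length - j
decreasing_by
  have : j < seg.length := hc.1
  omega

theorem runEndB_stop (seg : List String) (opp : String) (j : Nat) :
    runEndB seg opp j = seg.length ∨ ¬ seg[runEndB seg opp j]! = opp ∨ seg.length < runEndB seg opp j := by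
  unfold runEndB
  split
  · exact runEndB_stop seg opp (j+1)
  · next hc =>
    by_cases h1 : j < seg.length
    · right; left; intro h2; exact hc ⟨h1, h2⟩
    · by_cases h2 : j = seg.length
      · left; exact h2
      · right; right; omega
termination_by seg.length - j
decreasing_by omega

-- main loop equivalence: A's fold over the remaining indices produces max_opp_line = the run
-- described by B's scan, provided we stand at a run boundary
theorem mainLemma (seg : List String) (opp : String) :
    ∀ (m i : Nat) (oppL : List Nat) (bs bl : Nat), i + m = seg.length →
    ((i = 0 ∧ oppL = []) ∨ (0 < i ∧ ¬ seg[i-1]! = opp) ∨ ¬ seg[i]! = opp) →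
    ((List.range' i m).foldl (oppBodyA seg opp) (oppL, mkRun bs bl)).2
      = mkRun (scanB seg opp i bs bl).1 (scanB seg opp i bs bl).2 := by
  intro m
  induction m using Nat.strong_induction_on with
  | _ m ih =>
    intro i oppL bs bl hn hbnd
    cases m with
    | zero =>
      have hge : ¬ i < seg.length := by omega
      rw [scanB, dif_neg hge]
      simp
    | succ m' =>
      have hi : i < seg.length := by omega
      by_cases hop : seg[i]! = opp
      · -- start of a run
        set j := runEndB seg opp i with hj
        have hji : i < j := runEndB_gt seg opp i hi hop
        have hjle : j ≤ seg.length := runEndB_le seg opp i (by omega)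
        -- after the first cell of the run, opp_line is [i] regardless of the incoming oppL
        have hfirst : oppBodyA seg opp (oppL, mkRun bs bl) i
            = (mkRun i 1, mkRun (updB bs bl i 1).1 (updB bs bl i 1).2) := by
          unfold oppBodyA
          rw [if_pos hop]
          have hreset : (if 0 < i ∧ seg[i-1]! ≠ opp then ([] : List Nat) else oppL) = [] := by
            rcases hbnd with ⟨_, h2⟩ | ⟨h1, h2⟩ | h3
            · split
              · rfl
              · exact h2
            · rw [if_pos ⟨h1, h2⟩]
            · exact absurd hop h3
          rw [hreset]
          have h1 : ([] : List Nat) ++ [i] = mkRun i 1 := by simp [mkRun]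
          by_cases hb : bl < 1 <;>
            simp [updB, hb, h1, mkRun]
        -- split the index range at j
        have hsplit : List.range' i (m'+1) = List.range' i (j - i) ++ List.range' j (i + (m'+1) - j) := by
          conv_lhs => rw [show m' + 1 = (j - i) + (i + (m'+1) - j) from by omega]
          rw [← List.range'_append, show i + 1 * (j - i) = j from by omega]
        rw [hsplit, List.foldl_append]
        -- first chunk: the run [i, j)
        have hrunfold : (List.range' i (j - i)).foldl (oppBodyA seg opp) (oppL, mkRun bs bl)
            = (mkRun i (j - i), mkRun (updB bs bl i (j - i)).1 (updB bs bl i (j - i)).2) := by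
          have hcons : List.range' i (j - i) = i :: List.range' (i+1) (j - i - 1) := by
            conv_lhs => rw [show j - i = (j - i - 1) + 1 from by omega]
            rw [List.range'_succ]
          rw [hcons, List.foldl_cons, hfirst]
          have hint := runLemma seg opp (j - i - 1) (i+1) i bs bl (by omega)
            (by
              intro u h1 h2
              constructor
              · exact runEndB_mem seg opp i u (by omega) (by omega)
              · exact runEndB_mem seg opp i (u-1) (by omega) (by omega))
          have e1 : i + 1 - i = 1 := by omega
          rw [e1] at hint
          have e2 : i + 1 + (j - i - 1) - i = j - i := by omega
          rw [e2] at hint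
          exact hint
        rw [hrunfold]
        -- B takes the same step
        rw [scanB, dif_pos hi, dif_pos hop, ← hj]
        have hBstep : (if bl < j - i then scanB seg opp j i (j - i) else scanB seg opp j bs bl)
            = scanB seg opp j (updB bs bl i (j - i)).1 (updB bs bl i (j - i)).2 := by
          unfold updB
          split
          · rfl
          · rfl
        rw [hBstep]
        -- second chunk: recurse at j
        by_cases hjn : j = seg.length
        · have hz : i + (m'+1) - j = 0 := by omega
          rw [hz]
          simp only [List.range'_zero, List.foldl_nil]
          rw [scanB, dif_neg (by omega)]
        · have hjlt : j < seg.length := by omega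
          have hstop := runEndB_stop seg opp i
          rw [← hj] at hstop
          have hjop : ¬ seg[j]! = opp := by
            rcases hstop with h | h | h
            · omega
            · exact h
            · omega
          exact ih (i + (m'+1) - j) (by omega) j _ _ _ (by omega)
            (Or.inr (Or.inr (by simpa using hjop)))
      · -- not an opp cell: both sides step to i+1
        rw [List.range'_succ, List.foldl_cons]
        have hskip : oppBodyA seg opp (oppL, mkRun bs bl) i = (oppL, mkRun bs bl) := by
          unfold oppBodyA; rw [if_neg hop]
        rw [hskip]
        rw [scanB, dif_pos hi, dif_neg hop]
        exact ih m' (by omega) (i+1) oppL bs bl (by omega) (Or.inr (Or.inl ⟨by omega, by simpa using hop⟩))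

-- the whole of A's loop computes exactly B's scan result
theorem loop_eq (seg : List String) (opp : String) :
    ((List.range seg.length).foldl (oppBodyA seg opp) ([], [])).2
      = mkRun (scanB seg opp 0 0 0).1 (scanB seg opp 0 0 0).2 := by
  have h := mainLemma seg opp seg.length 0 [] 0 0 (by omega) (Or.inl ⟨rfl, rfl⟩)
  have e : List.range seg.length = List.range' 0 seg.length := by
    rw [List.range_eq_range']
  rw [e]
  have e2 : mkRun 0 0 = [] := rfl
  rw [← e2]
  exact h

-- count > 0 ↔ membership, used to align the two tails
theorem count_pos_iff (l : List String) (a : String) : 0 < l.count a ↔ a ∈ l :=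
  List.count_pos_iff

-- ===== VERDICT (by name: the statement is the Claim_ definition above) =====
theorem opp_blocked_spec : Claim_equal_opp_blocked := by
  intro curr opp seg k _
  unfold Spec_opp_blocked opp_blocked opp_blocked_alt
  simp only [loop_eq seg opp]
  generalize scanB seg opp 0 0 0 = p
  obtain ⟨bs, bl⟩ := p
  by_cases hbl : bl = 0
  · subst hbl
    simp [mkRun]
  · simp only [length_mkRun, head!_mkRun bs bl hbl, getLast!_mkRun bs bl hbl,
      mkRun_eq_nil_iff, count_pos_iff]
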